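-- pv_equiv track=rewrite | github.com/mmarcos05/Guia3conMartu | Luli/parcialesPython/parcialB.py | torneo_de_gallinas
-- ===== SOURCE A (Python) =====
-- def torneo_de_gallinas(estrategias:dict[str,str]) -> dict[str,int]:
--     dicc_final: dict[str,int] = {}
--     puntos_jug: int = 0
--
--     for jugador, estrategia in estrategias.items():
--         for rival, estrategia_rival in estrategias.items():
--             if jugador != rival:
--                 if (estrategia == "me desvio siempre") and (estrategia_rival == "me desvio simepre"):
--                     puntos_jug -= 10
--                 elif (estrategia == "me la banco y no me desvio") and (estrategia_rival == "me la banco y no me desvio"):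
--                     puntos_jug -= 5
--                 elif (estrategia == "me desvio siempre") and (estrategia_rival == "me la banco y no me desvio"):
--                     puntos_jug -= 15
--                 elif (estrategia == "me la banco y no me desvio") and (estrategia_rival == "me desvio simepre"):
--                     puntos_jug += 10
--         dicc_final[jugador] = puntos_jug
--         puntos_jug = 0
--     return dicc_final
-- ===== SOURCE B (Python) =====
-- S = "me desvio siempre"
-- BANCO = "me la banco y no me desvio"
-- TYPO = "me desvio simepre"
--
-- def torneo_de_gallinas(estrategias: dict[str, str]) -> dict[str, int]:
--     # One pass to count the two rival-side strategies, then each score in O(1).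
--     n_banco = sum(1 for v in estrategias.values() if v == BANCO)
--     n_typo = sum(1 for v in estrategias.values() if v == TYPO)
--     resultado: dict[str, int] = {}
--     for jugador, e in estrategias.items():
--         if e == S:
--             resultado[jugador] = -10 * n_typo - 15 * n_banco
--         elif e == BANCO:
--             resultado[jugador] = -5 * (n_banco - 1) + 10 * n_typo
--         else:
--             resultado[jugador] = 0
--     return resultado
-- ===== Notes on version B (the rewrite author's own statement) =====
-- stated objective: faster
-- what changed: Replaces the O(n^2) all-pairs rival scan with one pass counting the two rival-side strategy strings, from which each player's score is a closed-form O(1) expression (subtracting the player's own self-match).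
import Mathlib
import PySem

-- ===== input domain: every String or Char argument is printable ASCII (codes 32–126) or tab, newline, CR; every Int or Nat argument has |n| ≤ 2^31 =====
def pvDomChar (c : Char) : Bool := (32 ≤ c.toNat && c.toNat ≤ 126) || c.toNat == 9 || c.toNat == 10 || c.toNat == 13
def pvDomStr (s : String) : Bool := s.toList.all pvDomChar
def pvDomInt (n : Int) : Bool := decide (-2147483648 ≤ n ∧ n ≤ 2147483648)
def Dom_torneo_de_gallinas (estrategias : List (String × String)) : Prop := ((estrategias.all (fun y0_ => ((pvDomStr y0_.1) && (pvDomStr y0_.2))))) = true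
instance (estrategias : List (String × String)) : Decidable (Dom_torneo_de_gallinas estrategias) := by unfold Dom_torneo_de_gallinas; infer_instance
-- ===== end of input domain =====

-- B replaces A's O(n^2) all-pairs scan by one counting pass and an O(1) closed-form score per player (objective: faster).

-- ===== PORT A =====
def torneo_de_gallinas (estrategias : List (String × String)) : List (String × Int) :=
  (estrategias.foldl (fun dicc je =>
      dicc.insert je.1
        (estrategias.foldl (fun puntos re =>
            if je.1 ≠ re.1 then
              if je.2 = "me desvio siempre" ∧ re.2 = "me desvio simepre" then puntos - 10
              else if je.2 = "me la banco y no me desvio" ∧ re.2 = "me la banco y no me desvio" then puntos - 5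
              else if je.2 = "me desvio siempre" ∧ re.2 = "me la banco y no me desvio" then puntos - 15
              else if je.2 = "me la banco y no me desvio" ∧ re.2 = "me desvio simepre" then puntos + 10
              else puntos
            else puntos) (0 : Int)))
    (PySem.Dict.empty : PySem.Dict String Int)).items

-- ===== PORT B =====
def torneo_de_gallinas_alt (estrategias : List (String × String)) : List (String × Int) :=
  let nBanco : Int := (estrategias.countP (fun p => p.2 = "me la banco y no me desvio") : Int)
  let nTypo : Int := (estrategias.countP (fun p => p.2 = "me desvio simepre") : Int)
  estrategias.map (fun p =>
    (p.1, if p.2 = "me desvio siempre" then -10 * nTypo - 15 * nBanco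
          else if p.2 = "me la banco y no me desvio" then -5 * (nBanco - 1) + 10 * nTypo
          else 0))

-- ===== PRECONDITION & SPEC =====
-- Pre_ excludes association lists with duplicate keys: they represent no Python dict
-- (dict construction merges duplicate keys before A ever runs).
def Pre_torneo_de_gallinas (estrategias : List (String × String)) : Prop :=
  (estrategias.map Prod.fst).Nodup
instance (estrategias : List (String × String)) : Decidable (Pre_torneo_de_gallinas estrategias) := by
  unfold Pre_torneo_de_gallinas; infer_instance
def pvWitness_torneo_de_gallinas : (List (String × String)) :=
  [("ana", "me desvio siempre"), ("bob", "me la banco y no me desvio"), ("cleo", "me desvio simepre")]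
def Spec_torneo_de_gallinas (estrategias : List (String × String)) (out : List (String × Int)) : Prop := out = torneo_de_gallinas_alt estrategias
instance (estrategias : List (String × String)) (out : List (String × Int)) : Decidable (Spec_torneo_de_gallinas estrategias out) := by unfold Spec_torneo_de_gallinas; infer_instance

-- ===== CLAIM (what is proved, stated in full; the proofs are below) =====
def Claim_equal_torneo_de_gallinas : Prop := ∀ (estrategias : List (String × String)), Dom_torneo_de_gallinas estrategias → Pre_torneo_de_gallinas estrategias → Spec_torneo_de_gallinas estrategias (torneo_de_gallinas estrategias)

-- ===== LEMMAS AND PROOFS =====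

-- the per-matchup delta of A's branch table
def pvDelta (e er : String) : Int :=
  if e = "me desvio siempre" ∧ er = "me desvio simepre" then -10
  else if e = "me la banco y no me desvio" ∧ er = "me la banco y no me desvio" then -5
  else if e = "me desvio siempre" ∧ er = "me la banco y no me desvio" then -15
  else if e = "me la banco y no me desvio" ∧ er = "me desvio simepre" then 10
  else 0

-- A's inner loop is an accumulated sum of deltas over rivals with a different key
theorem pvInner_eq_sum (j e : String) (l : List (String × String)) (p : Int) :
    l.foldl (fun puntos re =>
        if j ≠ re.1 then
          if e = "me desvio siempre" ∧ re.2 = "me desvio simepre" then puntos - 10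
          else if e = "me la banco y no me desvio" ∧ re.2 = "me la banco y no me desvio" then puntos - 5
          else if e = "me desvio siempre" ∧ re.2 = "me la banco y no me desvio" then puntos - 15
          else if e = "me la banco y no me desvio" ∧ re.2 = "me desvio simepre" then puntos + 10
          else puntos
        else puntos) p
    = p + (l.map (fun re => if j ≠ re.1 then pvDelta e re.2 else 0)).sum := by
  induction l generalizing p with
  | nil => simp
  | cons a t ih =>
      simp only [List.foldl_cons, List.map_cons, List.sum_cons, ih]
      unfold pvDelta
      split_ifs <;> ring

-- summing the guarded delta over a nodup-key list containing (j,e):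
-- full delta sum minus the self matchup
theorem pvSum_unguard (j e : String) (t : List (String × String))
    (hj : ∀ re ∈ t, j ≠ re.1) :
    (t.map (fun re => if j ≠ re.1 then pvDelta e re.2 else 0)).sum
      = (t.map (fun re => pvDelta e re.2)).sum := by
  induction t with
  | nil => simp
  | cons b u ihu =>
      simp only [List.map_cons, List.sum_cons]
      rw [if_pos (hj b (by simp)), ihu (fun re hre => hj re (by simp [hre]))]

theorem pvSum_guard (j e : String) (l : List (String × String))
    (hnd : (l.map Prod.fst).Nodup) (hmem : (j, e) ∈ l) :
    (l.map (fun re => if j ≠ re.1 then pvDelta e re.2 else 0)).sum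
      = (l.map (fun re => pvDelta e re.2)).sum - pvDelta e e := by
  induction l with
  | nil => simp at hmem
  | cons a t ih =>
      simp only [List.map_cons, List.nodup_cons, List.mem_map] at hnd
      obtain ⟨hhead, hndt⟩ := hnd
      simp only [List.map_cons, List.sum_cons]
      rcases List.mem_cons.mp hmem with h | h
      · subst h
        have hj : ∀ re ∈ t, j ≠ re.1 := by
          intro re hre hEq
          exact hhead ⟨re, hre, hEq.symm⟩
        rw [pvSum_unguard j e t hj]
        simp
      · have hja : j ≠ a.1 := by
          intro hEq
          exact hhead ⟨(j, e), h, hEq⟩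
        rw [if_pos hja, ih hndt h]
        ring

-- the full delta sum is a closed form of the two counts
theorem pvSum_delta (e : String) (l : List (String × String)) :
    (l.map (fun re => pvDelta e re.2)).sum
      = (if e = "me desvio siempre" then
          -10 * ((l.countP (fun p => p.2 = "me desvio simepre") : Int))
            - 15 * ((l.countP (fun p => p.2 = "me la banco y no me desvio") : Int))
        else if e = "me la banco y no me desvio" then
          -5 * ((l.countP (fun p => p.2 = "me la banco y no me desvio") : Int))
            + 10 * ((l.countP (fun p => p.2 = "me desvio simepre") : Int))
        else 0) := by
  induction l with
  | nil => simp
  | cons a t ih =>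
      simp only [List.map_cons, List.sum_cons, List.countP_cons, ih]
      unfold pvDelta
      by_cases h1 : e = "me desvio siempre" <;>
        by_cases h2 : e = "me la banco y no me desvio" <;>
          by_cases h3 : a.2 = "me desvio simepre" <;>
            by_cases h4 : a.2 = "me la banco y no me desvio" <;>
              simp_all <;> ring

set_option maxRecDepth 8000 in
set_option maxHeartbeats 1000000 in
theorem torneo_main (estrategias : List (String × String))
    (hnd : (estrategias.map Prod.fst).Nodup) :
    torneo_de_gallinas estrategias = torneo_de_gallinas_alt estrategias := by
  unfold torneo_de_gallinas torneo_de_gallinas_alt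
  rw [PySem.Dict.items_foldl_insert_fresh
      estrategias
      Prod.fst
      (fun je => estrategias.foldl (fun puntos re =>
            if je.1 ≠ re.1 then
              if je.2 = "me desvio siempre" ∧ re.2 = "me desvio simepre" then puntos - 10
              else if je.2 = "me la banco y no me desvio" ∧ re.2 = "me la banco y no me desvio" then puntos - 5
              else if je.2 = "me desvio siempre" ∧ re.2 = "me la banco y no me desvio" then puntos - 15
              else if je.2 = "me la banco y no me desvio" ∧ re.2 = "me desvio simepre" then puntos + 10
              else puntos
            else puntos) (0 : Int))
      PySem.Dict.empty (by intro a _; rfl) hnd]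
  simp only [PySem.Dict.empty, List.nil_append]
  apply List.map_congr_left
  intro je hje
  have h1 := pvInner_eq_sum je.1 je.2 estrategias 0
  have h2 := pvSum_guard je.1 je.2 estrategias hnd (by simpa using hje)
  have h3 := pvSum_delta je.2 estrategias
  refine Prod.ext rfl ?_
  simp only [h1, h2, h3, zero_add]
  by_cases hS : je.2 = "me desvio siempre"
  · simp [pvDelta, hS]
  · by_cases hB : je.2 = "me la banco y no me desvio"
    · simp only [pvDelta, hB, String.reduceEq, and_false, false_and, and_self, if_false, if_true]
      ring
    · simp [pvDelta, hS, hB]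

-- ===== VERDICT (by name: the statement is the Claim_ definition above) =====
theorem torneo_de_gallinas_spec : Claim_equal_torneo_de_gallinas := by
  intro estrategias _ hpre
  unfold Spec_torneo_de_gallinas
  exact torneo_main estrategias hpre
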